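-- pv_equiv track=rewrite | github.com/shagindl/bincopy2sqlite | bincopy2sqlite.py | _crc32_update
-- ===== SOURCE A (Python) =====
-- def _crc32_update(crc, v):
--     CRC32_POLY = 0xEDB88320
--
--     crc = crc ^ v;
--     for i in range(8):
--         if crc & 1:
--             crc = (crc >> 1) ^ CRC32_POLY;
--         else:
--             crc = (crc >> 1);
--
--     return crc;
-- ===== SOURCE B (Python) =====
-- _CRC32_POLY = 0xEDB88320
--
--
-- def _crc_byte(b):
--     c = b
--     for _ in range(8):
--         c = ((c >> 1) ^ _CRC32_POLY) if (c & 1) else (c >> 1)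
--     return c
--
--
-- _CRC32_TABLE = [_crc_byte(b) for b in range(256)]
--
--
-- def _crc32_update(crc, v):
--     x = crc ^ v
--     return (x >> 8) ^ _CRC32_TABLE[x & 0xFF]
-- ===== Notes on version B (the rewrite author's own statement) =====
-- stated objective: idiomatic
-- what changed: Replaces the 8-iteration per-bit CRC32 loop by the standard table-driven step: a 256-entry CRC table is precomputed once at module level and the function body becomes (x >> 8) ^ TABLE[x & 0xFF] with x = crc ^ v.
import Mathlib
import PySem

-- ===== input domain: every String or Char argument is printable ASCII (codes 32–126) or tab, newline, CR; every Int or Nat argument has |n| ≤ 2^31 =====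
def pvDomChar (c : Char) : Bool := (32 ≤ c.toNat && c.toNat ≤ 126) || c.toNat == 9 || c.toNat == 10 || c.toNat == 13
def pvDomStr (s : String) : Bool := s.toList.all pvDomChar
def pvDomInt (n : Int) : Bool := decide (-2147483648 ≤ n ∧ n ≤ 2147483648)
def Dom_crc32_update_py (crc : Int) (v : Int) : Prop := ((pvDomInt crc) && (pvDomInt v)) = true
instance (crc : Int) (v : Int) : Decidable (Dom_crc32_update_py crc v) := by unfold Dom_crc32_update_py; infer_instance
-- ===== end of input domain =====

-- B replaces A's 8-iteration per-bit loop by a single lookup into the standard 256-entry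
-- CRC32 table built once at module level (table-driven CRC step); same value for every int.

-- ===== PORT A =====
-- literal port of A: crc = crc ^ v, then 8 rounds of the per-bit update
def crc32_update_py (crc : Int) (v : Int) : Int :=
  let CRC32_POLY : Int := 0xEDB88320
  let crc1 := PySem.Int.bxor crc v
  (PySem.List.pyRange 0 8 1).foldl
    (fun c _ => if PySem.Int.band c 1 ≠ 0 then PySem.Int.bxor (c >>> (1 : Nat)) CRC32_POLY
                else c >>> (1 : Nat))
    crc1

-- ===== PORT B =====
-- port of Source B's module-level helper _crc_byte
def pvCrcByte (b : Int) : Int :=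
  (PySem.List.pyRange 0 8 1).foldl
    (fun c _ => if PySem.Int.band c 1 ≠ 0 then PySem.Int.bxor (c >>> (1 : Nat)) (0xEDB88320 : Int)
                else c >>> (1 : Nat))
    b

-- port of Source B's module-level table _CRC32_TABLE
def pvCrcTable : List Int := (PySem.List.pyRange 0 256 1).map pvCrcByte

def crc32_update_py_alt (crc : Int) (v : Int) : Int :=
  let x := PySem.Int.bxor crc v
  -- x & 0xFF is always in [0, 256), so the Python indexing never raises; default 0 is never used
  PySem.Int.bxor (x >>> (8 : Nat)) (PySem.List.pyGetD pvCrcTable (PySem.Int.band x 255) 0)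

-- ===== PRECONDITION & SPEC =====
def Spec_crc32_update_py (crc : Int) (v : Int) (out : Int) : Prop := out = crc32_update_py_alt crc v
instance (crc : Int) (v : Int) (out : Int) : Decidable (Spec_crc32_update_py crc v out) := by unfold Spec_crc32_update_py; infer_instance

-- ===== CLAIM (what is proved, stated in full; the proofs are below) =====
def Claim_equal_crc32_update_py : Prop := ∀ (crc : Int) (v : Int), Dom_crc32_update_py crc v → Spec_crc32_update_py crc v (crc32_update_py crc v)

-- ===== LEMMAS AND PROOFS =====

-- the per-bit CRC step both programs are built from
def pvStep (c : Int) : Int :=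
  if PySem.Int.band c 1 ≠ 0 then PySem.Int.bxor (c >>> (1 : Nat)) (0xEDB88320 : Int)
  else c >>> (1 : Nat)

-- the parity mask pvStep xors in
def pvMask (c : Int) : Int := if PySem.Int.band c 1 ≠ 0 then (0xEDB88320 : Int) else 0

def pvStep8 (c : Int) : Int :=
  pvStep (pvStep (pvStep (pvStep (pvStep (pvStep (pvStep (pvStep c)))))))

-- constructor shapes of the PySem bitwise primitives
theorem pv_bxor_ofNat_negSucc (m n : Nat) :
    PySem.Int.bxor (m : Int) (Int.negSucc n) = Int.negSucc (m ^^^ n) := by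
  simp [PySem.Int.bxor, Int.negSucc_eq]; omega

theorem pv_bxor_negSucc_ofNat (m n : Nat) :
    PySem.Int.bxor (Int.negSucc m) (n : Int) = Int.negSucc (m ^^^ n) := by
  simp [PySem.Int.bxor, Int.negSucc_eq]; omega

theorem pv_bxor_negSucc_negSucc (m n : Nat) :
    PySem.Int.bxor (Int.negSucc m) (Int.negSucc n) = ((m ^^^ n : Nat) : Int) := by
  simp [PySem.Int.bxor, Int.negSucc_eq]; omega

theorem pv_band_one_ofNat (m : Nat) : PySem.Int.band (m : Int) 1 = ((m &&& 1 : Nat) : Int) := by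
  simp [PySem.Int.band]

theorem pv_band_one_negSucc (m : Nat) :
    PySem.Int.band (Int.negSucc m) 1 = ((1 - (m &&& 1) : Nat) : Int) := by
  simp [PySem.Int.band, Int.negSucc_eq]; omega

theorem pv_band255_ofNat (m : Nat) : PySem.Int.band (m : Int) 255 = ((m &&& 255 : Nat) : Int) := by
  simp [PySem.Int.band]

theorem pv_band255_negSucc (m : Nat) :
    PySem.Int.band (Int.negSucc m) 255 = ((255 - (255 &&& m) : Nat) : Int) := by
  simp [PySem.Int.band, Int.negSucc_eq]; omega

theorem pv_shiftRight_natCast (m k : Nat) : ((m : Int) >>> k) = ((m >>> k : Nat) : Int) := rfl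
theorem pv_shiftRight_negSucc (m k : Nat) : (Int.negSucc m) >>> k = Int.negSucc (m >>> k) := rfl
theorem pv_shiftLeft_natCast (m k : Nat) : ((m : Int) <<< k) = ((m <<< k : Nat) : Int) := rfl
theorem pv_shiftLeft_negSucc (m k : Nat) : (Int.negSucc m) <<< k = Int.negSucc ((m + 1) <<< k - 1) := rfl

theorem pv_bxor_assoc (a b c : Int) :
    PySem.Int.bxor (PySem.Int.bxor a b) c = PySem.Int.bxor a (PySem.Int.bxor b c) := by
  cases a <;> cases b <;> cases c <;>
    simp [Int.ofNat_eq_natCast, pv_bxor_ofNat_negSucc, pv_bxor_negSucc_ofNat,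
      pv_bxor_negSucc_negSucc, Nat.xor_assoc]

-- xor distributes over the arithmetic right shift
theorem pv_bxor_shiftRight (a b : Int) :
    (PySem.Int.bxor a b) >>> (1 : Nat) = PySem.Int.bxor (a >>> (1 : Nat)) (b >>> (1 : Nat)) := by
  cases a <;> cases b <;>
    simp only [Int.ofNat_eq_natCast, PySem.Int.bxor_natCast, pv_bxor_ofNat_negSucc,
      pv_bxor_negSucc_ofNat, pv_bxor_negSucc_negSucc, pv_shiftRight_natCast,
      pv_shiftRight_negSucc, Nat.shiftRight_xor_distrib]

-- the parity mask is xor-linear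
theorem pv_mask_bxor (a b : Int) :
    pvMask (PySem.Int.bxor a b) = PySem.Int.bxor (pvMask a) (pvMask b) := by
  have e1 : PySem.Int.bxor 0xEDB88320 0xEDB88320 = 0 := by decide
  have e2 : PySem.Int.bxor 0xEDB88320 0 = 0xEDB88320 := by decide
  have e3 : PySem.Int.bxor 0 0xEDB88320 = 0xEDB88320 := by decide
  have e4 : PySem.Int.bxor 0 0 = 0 := by decide
  rcases a with m | m <;> rcases b with n | n <;>
    · simp only [pvMask, Int.ofNat_eq_natCast, PySem.Int.bxor_natCast, pv_bxor_ofNat_negSucc,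
        pv_bxor_negSucc_ofNat, pv_bxor_negSucc_negSucc, pv_band_one_ofNat, pv_band_one_negSucc]
      have hmn : (m ^^^ n) &&& 1 = (m &&& 1) ^^^ (n &&& 1) := Nat.and_xor_distrib_right
      have hm : m &&& 1 = m % 2 := Nat.and_one_is_mod m
      have hn : n &&& 1 = n % 2 := Nat.and_one_is_mod n
      rcases Nat.mod_two_eq_zero_or_one m with h1 | h1 <;>
        rcases Nat.mod_two_eq_zero_or_one n with h2 | h2 <;>
        simp_all

theorem pv_step_eq (c : Int) : pvStep c = PySem.Int.bxor (c >>> (1 : Nat)) (pvMask c) := by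
  rw [pvStep, pvMask]
  split_ifs with h
  · rfl
  · rw [PySem.Int.bxor_zero]

theorem pv_bxor_swap (s t u w : Int) :
    PySem.Int.bxor (PySem.Int.bxor s t) (PySem.Int.bxor u w)
      = PySem.Int.bxor (PySem.Int.bxor s u) (PySem.Int.bxor t w) := by
  rw [pv_bxor_assoc, pv_bxor_assoc, ← pv_bxor_assoc t u w, PySem.Int.bxor_comm t u,
    pv_bxor_assoc u t w]

-- the per-bit step is xor-linear
theorem pv_step_bxor (a b : Int) :
    pvStep (PySem.Int.bxor a b) = PySem.Int.bxor (pvStep a) (pvStep b) := by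
  rw [pv_step_eq, pv_step_eq a, pv_step_eq b, pv_bxor_shiftRight, pv_mask_bxor, pv_bxor_swap]

theorem pv_step8_bxor (a b : Int) :
    pvStep8 (PySem.Int.bxor a b) = PySem.Int.bxor (pvStep8 a) (pvStep8 b) := by
  simp [pvStep8, pv_step_bxor]

-- a multiple of 2^(k+1) steps down by one shift, with no polynomial xor
theorem pv_step_shiftLeft (q : Int) (k : Nat) :
    pvStep (q <<< (k + 1)) = q <<< k := by
  rcases q with m | m
  · show pvStep ((m : Int) <<< (k+1)) = _
    rw [pvStep, pv_shiftLeft_natCast, pv_band_one_ofNat]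
    have h1 : (m <<< (k+1)) &&& 1 = 0 := by
      rw [Nat.and_one_is_mod, Nat.shiftLeft_eq, pow_succ, ← mul_assoc, Nat.mul_mod_left]
    have h2 : (m <<< (k+1) : Nat) >>> 1 = m <<< k := by
      rw [Nat.shiftLeft_eq, Nat.shiftLeft_eq, Nat.shiftRight_one, pow_succ, ← mul_assoc,
        Nat.mul_div_cancel _ (by norm_num)]
    rw [h1, if_neg (by simp), pv_shiftRight_natCast, h2]
    rfl
  · rw [pvStep, pv_shiftLeft_negSucc, pv_band_one_negSucc]
    have ht : 1 ≤ (m+1) * 2^k := Nat.mul_pos (by omega) (Nat.two_pow_pos k)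
    have hu : (m + 1) <<< (k+1) - 1 = 2 * ((m+1) * 2^k) - 1 := by
      rw [Nat.shiftLeft_eq, pow_succ]; ring_nf
    have h1 : ((m + 1) <<< (k+1) - 1) &&& 1 = 1 := by
      rw [Nat.and_one_is_mod, hu]; omega
    have h2 : ((m + 1) <<< (k+1) - 1) >>> 1 = (m+1) <<< k - 1 := by
      rw [Nat.shiftRight_one, hu, Nat.shiftLeft_eq]; omega
    rw [h1, if_neg (by simp), pv_shiftRight_negSucc, h2]
    rfl

theorem pv_shiftLeft_zero (q : Int) : q <<< (0 : Nat) = q := by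
  rcases q with m | m
  · rfl
  · rw [pv_shiftLeft_negSucc]; simp [Nat.shiftLeft_eq]

theorem pv_step8_high (q : Int) : pvStep8 (q <<< (8 : Nat)) = q := by
  rw [pvStep8, (by norm_num : (8 : Nat) = 7 + 1), pv_step_shiftLeft,
    (by norm_num : (7 : Nat) = 6 + 1), pv_step_shiftLeft,
    (by norm_num : (6 : Nat) = 5 + 1), pv_step_shiftLeft,
    (by norm_num : (5 : Nat) = 4 + 1), pv_step_shiftLeft,
    (by norm_num : (4 : Nat) = 3 + 1), pv_step_shiftLeft,
    (by norm_num : (3 : Nat) = 2 + 1), pv_step_shiftLeft,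
    (by norm_num : (2 : Nat) = 1 + 1), pv_step_shiftLeft,
    (by norm_num : (1 : Nat) = 0 + 1), pv_step_shiftLeft, pv_shiftLeft_zero]

-- the split of an int into its high bits and low byte, in two's complement
theorem pv_nat_decomp (m : Nat) : ((m >>> 8) <<< 8) ^^^ (m &&& 255) = m := by
  apply Nat.eq_of_testBit_eq
  intro i
  simp only [Nat.testBit_xor, Nat.testBit_shiftLeft, Nat.testBit_shiftRight, Nat.testBit_and]
  rcases Nat.lt_or_ge i 8 with h | h
  · have h255 : (255 : Nat).testBit i = true := by interval_cases i <;> decide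
    simp [h255, Nat.not_le.mpr h]
  · have h255 : (255 : Nat).testBit i = false := by
      apply Nat.testBit_eq_false_of_lt
      calc (255 : Nat) < 2^8 := by norm_num
        _ ≤ 2^i := Nat.pow_le_pow_right (by norm_num) h
    have hi : 8 + (i - 8) = i := by omega
    simp [h, h255, hi]

theorem pv_nat_decomp_neg (m : Nat) :
    ((m >>> 8 + 1) <<< 8 - 1) ^^^ (255 - (255 &&& m)) = m := by
  have hand : (255 : Nat) &&& m = m % 256 := by
    rw [Nat.and_comm]
    have h : (255 : Nat) = 2^8 - 1 := by norm_num
    rw [h, Nat.and_two_pow_sub_one_eq_mod]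
  have hr : m % 256 < 256 := Nat.mod_lt _ (by norm_num)
  have hsub : 255 - m % 256 = 255 ^^^ (m % 256) :=
    (by set_option maxRecDepth 8192 in decide : ∀ r < 256, 255 - r = 255 ^^^ r) _ hr
  have hu : (m >>> 8 + 1) <<< 8 - 1 = 2^8 * (m >>> 8) + 255 := by
    rw [Nat.shiftLeft_eq]; norm_num; omega
  rw [hand, hsub, hu]
  apply Nat.eq_of_testBit_eq
  intro i
  have h256 : (256 : Nat) = 2^8 := by norm_num
  simp only [Nat.testBit_xor, Nat.testBit_two_pow_mul_add _ (by norm_num : (255:Nat) < 2^8),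
    h256, Nat.testBit_mod_two_pow, Nat.testBit_shiftRight]
  rcases Nat.lt_or_ge i 8 with h | h
  · have h255 : (255 : Nat).testBit i = true := by interval_cases i <;> decide
    simp [h, h255]
  · have h255 : (255 : Nat).testBit i = false := by
      apply Nat.testBit_eq_false_of_lt
      calc (255 : Nat) < 2^8 := by norm_num
        _ ≤ 2^i := Nat.pow_le_pow_right (by norm_num) h
    have hi : 8 + (i - 8) = i := by omega
    simp [h255, hi, Nat.not_lt.mpr h]

theorem pv_decomp (x : Int) :
    PySem.Int.bxor ((x >>> (8 : Nat)) <<< (8 : Nat)) (PySem.Int.band x 255) = x := by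
  rcases x with m | m
  · show PySem.Int.bxor (((m : Int) >>> (8:Nat)) <<< (8:Nat)) (PySem.Int.band (m : Int) 255) = _
    rw [pv_band255_ofNat]
    have hms : ((m : Int) >>> (8:Nat)) <<< (8:Nat) = (((m >>> 8) <<< 8 : Nat) : Int) := rfl
    rw [hms, PySem.Int.bxor_natCast]
    exact congrArg _ (pv_nat_decomp m)
  · rw [pv_band255_negSucc, pv_shiftRight_negSucc, pv_shiftLeft_negSucc, pv_bxor_negSucc_ofNat,
      pv_nat_decomp_neg]

-- A's loop is pvStep8 of crc ^ v
theorem pv_A_eq (crc v : Int) : crc32_update_py crc v = pvStep8 (PySem.Int.bxor crc v) := by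
  have hr : PySem.List.pyRange 0 8 1 = [0, 1, 2, 3, 4, 5, 6, 7] := by decide
  rw [crc32_update_py, hr]
  simp only [List.foldl_cons, List.foldl_nil]
  rfl

-- B's table entries are pvStep8 of the byte
theorem pv_byte_eq (b : Int) : pvCrcByte b = pvStep8 b := by
  have hr : PySem.List.pyRange 0 8 1 = [0, 1, 2, 3, 4, 5, 6, 7] := by decide
  rw [pvCrcByte, hr]
  simp only [List.foldl_cons, List.foldl_nil]
  rfl

theorem pv_band255_lt (x : Int) :
    ∃ r : Nat, PySem.Int.band x 255 = (r : Int) ∧ r < 256 := by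
  rcases x with m | m
  · exact ⟨m &&& 255, pv_band255_ofNat m, Nat.lt_succ_of_le Nat.and_le_right⟩
  · exact ⟨255 - (255 &&& m), pv_band255_negSucc m, by omega⟩

-- the table-driven step computes the 8 per-bit rounds
theorem pv_main (x : Int) :
    pvStep8 x
      = PySem.Int.bxor (x >>> (8 : Nat)) (PySem.List.pyGetD pvCrcTable (PySem.Int.band x 255) 0) := by
  obtain ⟨r, hxr, hrlt⟩ := pv_band255_lt x
  have htbl : PySem.List.pyGetD pvCrcTable ((r : Nat) : Int) 0 = pvStep8 (r : Int) := by
    rw [pvCrcTable, show (256 : Int) = ((256 : Nat) : Int) from rfl,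
      PySem.List.pyGetD_map_pyRange pvCrcByte 256 r 0 hrlt, pv_byte_eq]
  calc pvStep8 x
      = pvStep8 (PySem.Int.bxor ((x >>> (8:Nat)) <<< (8:Nat)) (PySem.Int.band x 255)) := by
        rw [pv_decomp]
    _ = PySem.Int.bxor (pvStep8 ((x >>> (8:Nat)) <<< (8:Nat))) (pvStep8 (PySem.Int.band x 255)) :=
        pv_step8_bxor _ _
    _ = PySem.Int.bxor (x >>> (8:Nat)) (PySem.List.pyGetD pvCrcTable (PySem.Int.band x 255) 0) := by
        rw [pv_step8_high, hxr, htbl]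

-- ===== VERDICT (by name: the statement is the Claim_ definition above) =====
theorem crc32_update_py_spec : Claim_equal_crc32_update_py := by
  intro crc v _
  unfold Spec_crc32_update_py
  rw [pv_A_eq, crc32_update_py_alt, pv_main]
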